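-- pv_equiv track=rewrite | github.com/jnimbles03/farm-trader | evaluate.py | summarize_orders
-- ===== SOURCE A (Python) =====
-- from typing import Any
--
-- def summarize_orders(orders: list[dict[str, Any]]) -> dict[str, int]:
--     """Tally orders by status for last_run.json visibility."""
--     out: dict[str, int] = {"draft": 0, "live": 0, "filled": 0,
--                            "cancelled": 0, "expired": 0, "other": 0}
--     for o in orders:
--         s = o.get("status", "other")
--         if s in out:
--             out[s] += 1
--         else:
--             out["other"] += 1
--     return out
-- ===== SOURCE B (Python) =====
-- def summarize_orders(orders):
--     """Tally orders by status for last_run.json visibility."""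
--     statuses = [o.get("status", "other") for o in orders]
--     tally = {}
--     for s in statuses:
--         tally[s] = tally.get(s, 0) + 1
--     known = ["draft", "live", "filled", "cancelled", "expired"]
--     out = {k: tally.get(k, 0) for k in known}
--     out["other"] = len(statuses) - sum(out.values())
--     return out
-- ===== Notes on version B (the rewrite author's own statement) =====
-- stated objective: alternative
-- what changed: B replaces A's per-order if/else branching on a pre-seeded six-key dict with a two-phase tally-then-remap: first a frequency table of all raw statuses, then the five named counts are read off and 'other' is derived as the remainder (total minus the five named counts).
import Mathlib
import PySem

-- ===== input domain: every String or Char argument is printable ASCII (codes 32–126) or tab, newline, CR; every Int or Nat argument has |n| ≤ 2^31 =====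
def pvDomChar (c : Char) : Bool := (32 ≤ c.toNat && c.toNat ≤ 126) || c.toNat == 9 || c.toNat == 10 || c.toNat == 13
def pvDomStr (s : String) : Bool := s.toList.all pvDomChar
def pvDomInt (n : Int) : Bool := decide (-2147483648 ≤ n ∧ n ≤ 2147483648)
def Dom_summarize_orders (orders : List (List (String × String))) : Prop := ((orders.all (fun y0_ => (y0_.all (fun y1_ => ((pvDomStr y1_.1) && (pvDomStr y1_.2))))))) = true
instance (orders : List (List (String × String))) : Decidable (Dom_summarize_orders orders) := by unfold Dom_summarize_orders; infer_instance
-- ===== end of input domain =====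

-- B tallies all raw statuses first and derives 'other' as a remainder, instead of A's per-order if/else on a pre-seeded dict (same cost).
-- ===== PORT A =====
def summarize_orders (orders : List (List (String × String))) : List (String × Int) :=
  (orders.foldl
    (fun out o =>
      let s := PySem.Dict.getD (PySem.Dict.mk o) "status" "other"
      if PySem.Dict.contains out s then
        PySem.Dict.modify out s 0 (· + 1)
      else
        PySem.Dict.modify out "other" 0 (· + 1))
    (PySem.Dict.ofList [("draft", (0:Int)), ("live", 0), ("filled", 0),
                        ("cancelled", 0), ("expired", 0), ("other", 0)])).items

-- ===== PORT B =====
def summarize_orders_alt (orders : List (List (String × String))) : List (String × Int) :=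
  let statuses := orders.map (fun o => PySem.Dict.getD (PySem.Dict.mk o) "status" "other")
  let tally := statuses.foldl (fun d s => PySem.Dict.modify d s 0 (· + 1)) PySem.Dict.empty
  let known := ["draft", "live", "filled", "cancelled", "expired"]
  let out := known.map (fun k => (k, PySem.Dict.getD tally k 0))
  out ++ [("other", (statuses.length : Int) - (out.map Prod.snd).sum)]

-- ===== PRECONDITION & SPEC =====
def Spec_summarize_orders (orders : List (List (String × String))) (out : List (String × Int)) : Prop := out = summarize_orders_alt orders
instance (orders : List (List (String × String))) (out : List (String × Int)) : Decidable (Spec_summarize_orders orders out) := by unfold Spec_summarize_orders; infer_instance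

-- ===== CLAIM (what is proved, stated in full; the proofs are below) =====
def Claim_equal_summarize_orders : Prop := ∀ (orders : List (List (String × String))), Dom_summarize_orders orders → Spec_summarize_orders orders (summarize_orders orders)

-- ===== LEMMAS AND PROOFS =====

def pvStatus (o : List (String × String)) : String :=
  PySem.Dict.getD (PySem.Dict.mk o) "status" "other"

def pvStep (out : PySem.Dict String Int) (o : List (String × String)) : PySem.Dict String Int :=
  let s := PySem.Dict.getD (PySem.Dict.mk o) "status" "other"
  if PySem.Dict.contains out s then
    PySem.Dict.modify out s 0 (· + 1)
  else
    PySem.Dict.modify out "other" 0 (· + 1)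

theorem pvStep_eq (out : PySem.Dict String Int) (o : List (String × String)) :
    pvStep out o = (if PySem.Dict.contains out (pvStatus o) then
        PySem.Dict.modify out (pvStatus o) 0 (· + 1)
      else
        PySem.Dict.modify out "other" 0 (· + 1)) := rfl

theorem summarize_orders_eq_foldl (orders : List (List (String × String))) :
    summarize_orders orders
    = (orders.foldl pvStep
        (PySem.Dict.mk [("draft", (0:Int)), ("live", 0), ("filled", 0),
                        ("cancelled", 0), ("expired", 0), ("other", 0)])).items := rfl

theorem step_draft (o : List (String × String)) (a b c d e f : Int) (h : pvStatus o = "draft") :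
    pvStep (PySem.Dict.mk [("draft", a), ("live", b), ("filled", c),
                      ("cancelled", d), ("expired", e), ("other", f)]) o
    = PySem.Dict.mk [("draft", a + 1), ("live", b), ("filled", c),
                      ("cancelled", d), ("expired", e), ("other", f)] := by
  rw [pvStep_eq, h]
  simp [PySem.Dict.contains, PySem.Dict.modify, PySem.Dict.insert,
    PySem.Dict.getD, PySem.Dict.get?]

theorem step_live (o : List (String × String)) (a b c d e f : Int) (h : pvStatus o = "live") :
    pvStep (PySem.Dict.mk [("draft", a), ("live", b), ("filled", c),
                      ("cancelled", d), ("expired", e), ("other", f)]) o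
    = PySem.Dict.mk [("draft", a), ("live", b + 1), ("filled", c),
                      ("cancelled", d), ("expired", e), ("other", f)] := by
  rw [pvStep_eq, h]
  simp [PySem.Dict.contains, PySem.Dict.modify, PySem.Dict.insert,
    PySem.Dict.getD, PySem.Dict.get?]

theorem step_filled (o : List (String × String)) (a b c d e f : Int) (h : pvStatus o = "filled") :
    pvStep (PySem.Dict.mk [("draft", a), ("live", b), ("filled", c),
                      ("cancelled", d), ("expired", e), ("other", f)]) o
    = PySem.Dict.mk [("draft", a), ("live", b), ("filled", c + 1),
                      ("cancelled", d), ("expired", e), ("other", f)] := by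
  rw [pvStep_eq, h]
  simp [PySem.Dict.contains, PySem.Dict.modify, PySem.Dict.insert,
    PySem.Dict.getD, PySem.Dict.get?]

theorem step_cancelled (o : List (String × String)) (a b c d e f : Int) (h : pvStatus o = "cancelled") :
    pvStep (PySem.Dict.mk [("draft", a), ("live", b), ("filled", c),
                      ("cancelled", d), ("expired", e), ("other", f)]) o
    = PySem.Dict.mk [("draft", a), ("live", b), ("filled", c),
                      ("cancelled", d + 1), ("expired", e), ("other", f)] := by
  rw [pvStep_eq, h]
  simp [PySem.Dict.contains, PySem.Dict.modify, PySem.Dict.insert,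
    PySem.Dict.getD, PySem.Dict.get?]

theorem step_expired (o : List (String × String)) (a b c d e f : Int) (h : pvStatus o = "expired") :
    pvStep (PySem.Dict.mk [("draft", a), ("live", b), ("filled", c),
                      ("cancelled", d), ("expired", e), ("other", f)]) o
    = PySem.Dict.mk [("draft", a), ("live", b), ("filled", c),
                      ("cancelled", d), ("expired", e + 1), ("other", f)] := by
  rw [pvStep_eq, h]
  simp [PySem.Dict.contains, PySem.Dict.modify, PySem.Dict.insert,
    PySem.Dict.getD, PySem.Dict.get?]

-- a status equal to "other" and an unrecognised status both bump the 'other' slot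
theorem step_rest (o : List (String × String)) (a b c d e f : Int)
    (h1 : pvStatus o ≠ "draft") (h2 : pvStatus o ≠ "live") (h3 : pvStatus o ≠ "filled")
    (h4 : pvStatus o ≠ "cancelled") (h5 : pvStatus o ≠ "expired") :
    pvStep (PySem.Dict.mk [("draft", a), ("live", b), ("filled", c),
                      ("cancelled", d), ("expired", e), ("other", f)]) o
    = PySem.Dict.mk [("draft", a), ("live", b), ("filled", c),
                      ("cancelled", d), ("expired", e), ("other", f + 1)] := by
  by_cases h6 : pvStatus o = "other"
  · rw [pvStep_eq, h6]
    simp [PySem.Dict.contains, PySem.Dict.modify, PySem.Dict.insert,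
      PySem.Dict.getD, PySem.Dict.get?]
  · rw [pvStep_eq]
    simp [PySem.Dict.contains, PySem.Dict.modify, PySem.Dict.insert,
      PySem.Dict.getD, PySem.Dict.get?, Ne.symm h1, Ne.symm h2,
      Ne.symm h3, Ne.symm h4, Ne.symm h5, Ne.symm h6]

-- invariant for A's loop: from any six-value seed, the fold adds each named count and the remainder to 'other'
theorem foldA_items (orders : List (List (String × String))) (a b c d e f : Int) :
    (orders.foldl pvStep
      (PySem.Dict.mk [("draft", a), ("live", b), ("filled", c),
                      ("cancelled", d), ("expired", e), ("other", f)])).items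
    = [("draft", a + ((orders.map pvStatus).count "draft" : Int)),
       ("live", b + ((orders.map pvStatus).count "live" : Int)),
       ("filled", c + ((orders.map pvStatus).count "filled" : Int)),
       ("cancelled", d + ((orders.map pvStatus).count "cancelled" : Int)),
       ("expired", e + ((orders.map pvStatus).count "expired" : Int)),
       ("other", f + (((orders.map pvStatus).length : Int)
          - (((orders.map pvStatus).count "draft" : Int) + ((orders.map pvStatus).count "live" : Int)
             + ((orders.map pvStatus).count "filled" : Int) + ((orders.map pvStatus).count "cancelled" : Int)
             + ((orders.map pvStatus).count "expired" : Int))))] := by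
  induction orders generalizing a b c d e f with
  | nil => simp
  | cons o rest ih =>
    simp only [List.foldl_cons, List.map_cons]
    by_cases h1 : pvStatus o = "draft"
    · rw [step_draft o a b c d e f h1, ih]
      simp [h1]; omega
    · by_cases h2 : pvStatus o = "live"
      · rw [step_live o a b c d e f h2, ih]
        simp [h2]; omega
      · by_cases h3 : pvStatus o = "filled"
        · rw [step_filled o a b c d e f h3, ih]
          simp [h3]; omega
        · by_cases h4 : pvStatus o = "cancelled"
          · rw [step_cancelled o a b c d e f h4, ih]
            simp [h4]; omega
          · by_cases h5 : pvStatus o = "expired"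
            · rw [step_expired o a b c d e f h5, ih]
              simp [h5]; omega
            · rw [step_rest o a b c d e f h1 h2 h3 h4 h5, ih]
              simp [h1, h2, h3, h4, h5]; omega

-- ===== VERDICT (by name: the statement is the Claim_ definition above) =====
theorem summarize_orders_spec : Claim_equal_summarize_orders := by
  intro orders _
  show summarize_orders orders = summarize_orders_alt orders
  rw [summarize_orders_eq_foldl, foldA_items]
  simp only [summarize_orders_alt, List.map_cons, List.map_nil]
  rw [show (orders.map fun o => PySem.Dict.getD (PySem.Dict.mk o) "status" "other") = orders.map pvStatus from rfl]
  simp [PySem.Dict.getD_foldl_modify_add_one, PySem.Dict.getD_empty]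
  ring_nf
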